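-- pv_equiv track=rewrite | github.com/yu-je0ng/programmers | level_1/과일장수.py | solution
-- ===== SOURCE A (Python) =====
-- def solution(k, m, score):
--     answer = 0
--     score = sorted(score, reverse = True) # 등급 기준 박스 구분 가능.
--     box_cnt = len(score) // m # 판매가능한 박스 개수
--     for inx in range(1, box_cnt+1):
--         low_price = inx * m # 하나의 박스에서의 최저 사과 점수
--         price = score[low_price-1] * m # 하나의 박스에서 얻을 수 있는 최대 이익
--         answer += price
--     return answer
-- ===== SOURCE B (Python) =====
-- def solution(k, m, score):
--     # Frequency-table approach: tally grades in a dict, sort only the distinct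
--     # grades descending, and walk cumulative counts to find each box minimum.
--     cnt = {}
--     for s in score:
--         cnt[s] = cnt.get(s, 0) + 1
--     boxes = len(score) // m
--     total = 0
--     pos = 0   # apples accounted for, from the highest grade down
--     j = 1     # next box whose minimum (the j*m-th largest apple) is pending
--     for v in sorted(cnt, reverse=True):
--         pos += cnt[v]
--         while j <= boxes and j * m <= pos:
--             total += v * m
--             j += 1
--     return total
-- ===== Notes on version B (the rewrite author's own statement) =====
-- stated objective: alternative
-- what changed: B never sorts the full score list: it builds a frequency dict in one pass, sorts only the distinct grades descending, and walks cumulative counts with a box pointer to emit each box minimum, where A fully sorts descending and indexes at multiples of m.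
import Mathlib
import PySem

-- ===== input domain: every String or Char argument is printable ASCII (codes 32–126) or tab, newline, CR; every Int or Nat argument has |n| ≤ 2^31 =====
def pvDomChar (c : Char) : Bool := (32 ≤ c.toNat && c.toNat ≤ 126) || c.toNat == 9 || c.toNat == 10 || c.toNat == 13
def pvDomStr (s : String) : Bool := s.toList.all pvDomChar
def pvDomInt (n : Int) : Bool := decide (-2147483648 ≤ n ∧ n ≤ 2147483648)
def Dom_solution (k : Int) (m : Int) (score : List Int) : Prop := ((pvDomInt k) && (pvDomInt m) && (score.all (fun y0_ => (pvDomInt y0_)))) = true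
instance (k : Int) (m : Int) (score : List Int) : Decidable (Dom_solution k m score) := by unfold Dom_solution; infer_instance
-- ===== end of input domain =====

-- B replaces A's full descending sort with a frequency dict: it sorts only the distinct
-- grades and walks cumulative counts with a box pointer (objective: alternative).

-- ===== PORT A =====
def solution (k : Int) (m : Int) (score : List Int) : Int :=
  let answer : Int := 0
  let score := PySem.List.sorted score (fun x => x) true
  let box_cnt := PySem.Int.floordiv (PySem.List.len score) m
  (PySem.List.pyRange 1 (box_cnt + 1) 1).foldl
    (fun answer inx =>
      let low_price := inx * m
      let price := PySem.List.pyGetD score (low_price - 1) 0 * m  -- in range for every box under Pre_ (m ≠ 0)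
      answer + price) answer

-- ===== PORT B =====
-- the inner 'while j <= boxes and j * m <= pos' loop of Source B
def bWhile (m boxes v pos j total : Int) : Int × Int :=
  if j ≤ boxes ∧ j * m ≤ pos then bWhile m boxes v pos (j + 1) (total + v * m)
  else (j, total)
termination_by (boxes + 1 - j).toNat
decreasing_by omega

def solution_alt (k : Int) (m : Int) (score : List Int) : Int :=
  let cnt := score.foldl (fun d s => d.insert s (d.getD s 0 + 1)) (PySem.Dict.empty)
  let boxes := PySem.Int.floordiv (PySem.List.len score) m
  let st := (PySem.List.sorted (PySem.Dict.keys cnt) (fun x => x) true).foldl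
      (fun (st : Int × Int × Int) v =>
        let pos := st.1 + cnt.getD v 0
        let jt := bWhile m boxes v pos st.2.1 st.2.2
        (pos, jt.1, jt.2))
      (0, 1, 0)
  st.2.2

-- ===== PRECONDITION & SPEC =====
-- Pre_ excludes only m = 0, where A raises ZeroDivisionError (len(score) // m).
def Pre_solution (k : Int) (m : Int) (score : List Int) : Prop := m ≠ 0
instance (k : Int) (m : Int) (score : List Int) : Decidable (Pre_solution k m score) := by unfold Pre_solution; infer_instance
def pvWitness_solution : Int × Int × List Int := (4, 3, [2, 1, 3, 4, 1, 2, 3])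
def Spec_solution (k : Int) (m : Int) (score : List Int) (out : Int) : Prop := out = solution_alt k m score
instance (k : Int) (m : Int) (score : List Int) (out : Int) : Decidable (Spec_solution k m score out) := by unfold Spec_solution; infer_instance

-- ===== CLAIM (what is proved, stated in full; the proofs are below) =====
def Claim_equal_solution : Prop := ∀ (k : Int) (m : Int) (score : List Int), Dom_solution k m score → Pre_solution k m score → Spec_solution k m score (solution k m score)

-- ===== LEMMAS AND PROOFS =====

theorem floordiv_nonpos_of_neg (n m : Int) (hn : 0 ≤ n) (hm : m < 0) :
    PySem.Int.floordiv n m ≤ 0 := by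
  by_contra h
  have hq : 1 ≤ PySem.Int.floordiv n m := by omega
  have hmod := PySem.Int.mod_neg_bounds n hm
  have heq := PySem.Int.floordiv_mul_add_mod n m
  have : PySem.Int.floordiv n m * m ≤ 1 * m :=
    mul_le_mul_of_nonpos_right hq hm.le
  omega

theorem A_neg (k m : Int) (score : List Int) (hm : m < 0) : solution k m score = 0 := by
  simp only [solution, PySem.List.len_eq, PySem.List.length_sorted]
  have hq := floordiv_nonpos_of_neg (score.length : Int) m (by positivity) hm
  rw [PySem.List.pyRange_one]
  have h0 : (PySem.Int.floordiv (score.length : Int) m + 1 - 1).toNat = 0 := by omega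
  rw [h0]
  rfl

theorem B_loop_frozen (m boxes : Int) (hb : boxes < 1) (f : Int → Int) :
    ∀ (vs : List Int) (pos : Int),
      (vs.foldl (fun (st : Int × Int × Int) v =>
          let pos := st.1 + f v
          let jt := bWhile m boxes v pos st.2.1 st.2.2
          (pos, jt.1, jt.2)) (pos, 1, 0)).2.2 = 0 := by
  intro vs
  induction vs with
  | nil => intro pos; rfl
  | cons v vt ih =>
    intro pos
    have hw : bWhile m boxes v (pos + f v) 1 0 = (1, 0) := by
      rw [bWhile]; simp only [if_neg (by omega : ¬((1:Int) ≤ boxes ∧ 1 * m ≤ pos + f v))]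
    simp only [List.foldl_cons, hw]
    exact ih (pos + f v)

theorem B_neg (k m : Int) (score : List Int) (hm : m < 0) : solution_alt k m score = 0 := by
  simp only [solution_alt, PySem.List.len_eq]
  have hq := floordiv_nonpos_of_neg (score.length : Int) m (by positivity) hm
  exact B_loop_frozen m _ (by omega) _ _ 0

theorem A_eval (mn : Nat) (hm : 1 ≤ mn) (k : Int) (score : List Int) :
    solution k (mn : Int) score
      = ∑ i ∈ Finset.range (score.length / mn),
          (PySem.List.sorted score (fun x => x) true).getD ((i + 1) * mn - 1) 0 * (mn : Int) := by
  simp only [solution, PySem.List.len_eq, PySem.List.length_sorted]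
  rw [PySem.Int.floordiv_natCast, PySem.List.foldl_add
    (g := fun inx => PySem.List.pyGetD (PySem.List.sorted score (fun x => x) true) (inx * (mn : Int) - 1) 0 * (mn : Int)),
    zero_add, PySem.List.pyRange_one, List.map_map]
  rw [show (((score.length / mn : Nat) : Int) + 1 - 1).toNat = score.length / mn by
    generalize (score.length / mn : Nat) = q; omega]
  rw [List.map_congr_left
    (g := fun i => (PySem.List.sorted score (fun x => x) true).getD ((i + 1) * mn - 1) 0 * (mn : Int))
    (by
      intro i _
      simp only [Function.comp_apply]
      have h1 : 1 ≤ (i + 1) * mn := Nat.mul_pos i.succ_pos (by omega)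
      have hc : ((1 : Int) + i) * (mn : Int) - 1 = (((i + 1) * mn - 1 : Nat) : Int) := by
        rw [Nat.cast_sub h1]; push_cast; ring
      rw [hc, PySem.List.pyGetD_natCast])]
  rfl

-- two permuted lists, both sorted descending, are equal
theorem desc_antisymm (l1 l2 : List Int) (hp : l1.Perm l2)
    (h1 : l1.Pairwise (fun a b => b ≤ a)) (h2 : l2.Pairwise (fun a b => b ≤ a)) : l1 = l2 := by
  have := PySem.List.eq_of_perm_of_pairwise_le_of_injective
    (l₁ := l1.reverse) (l₂ := l2.reverse) (fun x : Int => x) (fun a b h => h)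
    ((l1.reverse_perm).trans (hp.trans (l2.reverse_perm).symm))
    (List.pairwise_reverse.mpr h1) (List.pairwise_reverse.mpr h2)
  exact List.reverse_inj.mp this

theorem vs_pairwise (score : List Int) :
    (PySem.List.sorted (PySem.Set.ofList score) (fun x => x) true).Pairwise
      (fun a b : Int => b < a) := by
  have hnd : (PySem.List.sorted (PySem.Set.ofList score) (fun x => x) true).Nodup :=
    ((PySem.List.sorted_perm (PySem.Set.ofList score) (fun x => x) true).nodup_iff).mpr
      (PySem.Set.nodup_ofList score)
  have hle := PySem.List.sorted_pairwise_rev (PySem.Set.ofList score) (fun x => x)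
  exact (hle.and hnd).imp (fun {a b} h => lt_of_le_of_ne h.1 (Ne.symm h.2))

theorem count_flat (c : Int → Nat) (x : Int) :
    ∀ vs : List Int, vs.Nodup →
      (vs.flatMap (fun v => List.replicate (c v) v)).count x = if x ∈ vs then c x else 0 := by
  intro vs
  induction vs with
  | nil => simp
  | cons v vt ih =>
    intro hnd
    rw [List.flatMap_cons, List.count_append, List.count_replicate, ih hnd.of_cons]
    by_cases hxv : x = v
    · subst hxv
      simp [(List.nodup_cons.mp hnd).1]
    · simp [hxv, Ne.symm hxv, List.mem_cons]

theorem pairwise_flat (c : Int → Nat) :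
    ∀ vs : List Int, vs.Pairwise (fun a b : Int => b < a) →
      (vs.flatMap (fun v => List.replicate (c v) v)).Pairwise (fun a b : Int => b ≤ a) := by
  intro vs
  induction vs with
  | nil => simp
  | cons v vt ih =>
    intro hpw
    rw [List.flatMap_cons]
    rcases List.pairwise_cons.mp hpw with ⟨hhead, htail⟩
    refine List.pairwise_append.mpr ⟨List.pairwise_replicate.mpr (Or.inr le_rfl), ih htail, ?_⟩
    intro a ha b hb
    obtain ⟨w, hw, hbw⟩ := List.mem_flatMap.mp hb
    rw [List.eq_of_mem_replicate hbw, List.eq_of_mem_replicate ha]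
    exact (hhead w hw).le

-- the descending sort is the concatenation of constant blocks over the distinct values, descending
theorem desc_eq_flat (score : List Int) :
    PySem.List.sorted score (fun x => x) true
      = (PySem.List.sorted (PySem.Set.ofList score) (fun x => x) true).flatMap
          (fun v => List.replicate (score.count v) v) := by
  set vs := PySem.List.sorted (PySem.Set.ofList score) (fun x => x) true with hvs
  have hnd : vs.Nodup :=
    ((PySem.List.sorted_perm (PySem.Set.ofList score) (fun x => x) true).nodup_iff).mpr
      (PySem.Set.nodup_ofList score)
  have hmem : ∀ x : Int, x ∈ vs ↔ x ∈ score := fun x =>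
    (PySem.List.mem_sorted (PySem.Set.ofList score) (fun x => x) true x).trans
      (PySem.Set.mem_ofList score x)
  apply desc_antisymm
  · refine (PySem.List.sorted_perm score (fun x => x) true).trans (List.perm_iff_count.mpr ?_)
    intro x
    rw [count_flat (fun v => score.count v) x vs hnd]
    by_cases hx : x ∈ vs
    · simp [hx]
    · simp [hx, List.count_eq_zero.mpr (fun h => hx ((hmem x).mpr h))]
  · exact PySem.List.sorted_pairwise_rev score (fun x => x)
  · exact pairwise_flat (fun v => score.count v) vs (vs_pairwise score)

theorem bWhile_spec (m boxes v pos j total : Int) :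
    ∃ j', bWhile m boxes v pos j total = (j', total + v * m * (j' - j)) ∧ j ≤ j' ∧
      (∀ i, j ≤ i → i < j' → i ≤ boxes ∧ i * m ≤ pos) ∧ ¬(j' ≤ boxes ∧ j' * m ≤ pos) := by
  fun_induction bWhile m boxes v pos j total with
  | case1 j total h ih =>
    obtain ⟨j', heq, hle, hmid, hstop⟩ := ih
    refine ⟨j', ?_, by omega, ?_, hstop⟩
    · rw [heq]
      exact congrArg _ (by ring)
    · intro i hi1 hi2
      rcases eq_or_lt_of_le hi1 with rfl | hlt
      · exact h
      · exact hmid i (by omega) hi2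
  | case2 j total h =>
    refine ⟨j, ?_, le_refl j, ?_, h⟩
    · exact congrArg _ (by ring)
    · intro i hi1 hi2; omega

theorem loop_inv (mn : Nat) (hm : 1 ≤ mn) (boxes : Int) (a : List Int) (c : Int → Int)
    (hbox : boxes * mn ≤ a.length) :
    ∀ (vs : List Int) (pos j total : Int),
      vs.Pairwise (fun x y => y < x) →
      (∀ v ∈ vs, 1 ≤ c v) →
      0 ≤ pos →
      a.drop pos.toNat = vs.flatMap (fun v => List.replicate (c v).toNat v) →
      1 ≤ j → j ≤ boxes + 1 → (j - 1) * mn ≤ pos → (j ≤ boxes → pos < j * mn) →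
      total = ∑ i ∈ Finset.range (j - 1).toNat, a.getD ((i + 1) * mn - 1) 0 * (mn : Int) →
      (vs.foldl (fun (st : Int × Int × Int) v =>
          let pos := st.1 + c v
          let jt := bWhile (mn : Int) boxes v pos st.2.1 st.2.2
          (pos, jt.1, jt.2)) (pos, j, total)).2.2
        = ∑ i ∈ Finset.range boxes.toNat, a.getD ((i + 1) * mn - 1) 0 * (mn : Int) := by
  intro vs
  induction vs with
  | nil =>
    intro pos j total _ _ hpos hdrop h1 h2 h3 h4 htot
    simp only [List.foldl_nil]
    have hlw := congrArg List.length hdrop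
    simp only [List.length_drop, List.flatMap_nil, List.length_nil] at hlw
    have hj : j = boxes + 1 := by
      by_contra hne
      have hjb : j ≤ boxes := by omega
      have hlt := h4 hjb
      have hmul : j * (mn : Int) ≤ boxes * (mn : Int) :=
        mul_le_mul_of_nonneg_right hjb (by positivity)
      omega
    subst hj
    rw [htot, show (boxes + 1 - 1).toNat = boxes.toNat by omega]
  | cons v vt ih =>
    intro pos j total hpw hc hpos hdrop h1 h2 h3 h4 htot
    have hcv : 1 ≤ c v := hc v (List.mem_cons_self)
    rw [List.flatMap_cons] at hdrop
    have hlw := congrArg List.length hdrop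
    simp only [List.length_drop, List.length_append, List.length_replicate] at hlw
    have hlen1 : pos.toNat + (c v).toNat ≤ a.length := by omega
    simp only [List.foldl_cons]
    obtain ⟨j', heq, hle, hmid, hstop⟩ := bWhile_spec (mn : Int) boxes v (pos + c v) j total
    have hj'2 : j' ≤ boxes + 1 := by
      rcases eq_or_lt_of_le hle with rfl | hlt
      · exact h2
      · have := (hmid (j' - 1) (by omega) (by omega)).1
        omega
    have key : ∀ i' : Nat, (j - 1).toNat ≤ i' → i' < (j' - 1).toNat →
        a.getD ((i' + 1) * mn - 1) 0 = v := by
      intro i' hi1 hi2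
      have hji : j ≤ (i' : Int) + 1 := by omega
      have hij' : (i' : Int) + 1 < j' := by omega
      obtain ⟨hib, him⟩ := hmid ((i' : Int) + 1) hji hij'
      have hjb : j ≤ boxes := le_trans hji hib
      have hlow : pos < ((i' : Int) + 1) * (mn : Int) :=
        lt_of_lt_of_le (h4 hjb) (mul_le_mul_of_nonneg_right hji (by positivity))
      have hmn1 : 1 ≤ (i' + 1) * mn := Nat.mul_pos i'.succ_pos (by omega)
      have hidxI : (((i' + 1) * mn - 1 : Nat) : Int) = ((i' : Int) + 1) * (mn : Int) - 1 := by
        rw [Nat.cast_sub hmn1]; push_cast; ring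
      have hb1 : pos.toNat ≤ (i' + 1) * mn - 1 := by omega
      have hb2 : (i' + 1) * mn - 1 < pos.toNat + (c v).toNat := by omega
      have h5 : (a.drop pos.toNat)[(i' + 1) * mn - 1 - pos.toNat]? = some v := by
        rw [hdrop, List.getElem?_append_left (by
          simpa using (by omega : (i' + 1) * mn - 1 - pos.toNat < (c v).toNat))]
        simp [(by omega : (i' + 1) * mn - 1 - pos.toNat < (c v).toNat)]
      rw [List.getElem?_drop] at h5
      rw [show pos.toNat + ((i' + 1) * mn - 1 - pos.toNat) = (i' + 1) * mn - 1 by omega] at h5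
      rw [List.getD_eq_getElem?_getD, h5]
      rfl
    have htot' : total + v * (mn : Int) * (j' - j)
        = ∑ i' ∈ Finset.range (j' - 1).toNat, a.getD ((i' + 1) * mn - 1) 0 * (mn : Int) := by
      rw [htot]
      have hsub : (j - 1).toNat ≤ (j' - 1).toNat := by omega
      rw [Finset.range_eq_Ico, ← Finset.sum_Ico_consecutive _ (Nat.zero_le _) hsub,
        ← Finset.range_eq_Ico]
      have hconst : ∀ i' ∈ Finset.Ico (j - 1).toNat (j' - 1).toNat,
          a.getD ((i' + 1) * mn - 1) 0 * (mn : Int) = v * (mn : Int) := by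
        intro i' hi
        rw [key i' (Finset.mem_Ico.mp hi).1 (Finset.mem_Ico.mp hi).2]
      rw [Finset.sum_congr rfl hconst, Finset.sum_const, Nat.card_Ico, nsmul_eq_mul]
      have hcast : (((j' - 1).toNat - (j - 1).toNat : Nat) : Int) = j' - j := by omega
      rw [hcast]
      ring
    have hdrop' : a.drop (pos + c v).toNat = vt.flatMap (fun v => List.replicate (c v).toNat v) := by
      have hpn : (pos + c v).toNat = pos.toNat + (c v).toNat := by omega
      rw [hpn, ← List.drop_drop, hdrop]
      exact List.drop_left' (by simp)
    rw [heq, htot']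
    exact ih (pos + c v) j' _ hpw.of_cons (fun w hw => hc w (List.mem_cons_of_mem v hw))
      (by omega) hdrop' (by omega) hj'2
      (by
        rcases eq_or_lt_of_le hle with heqj | hlt
        · rw [← heqj]
          omega
        · exact (hmid (j' - 1) (by omega) (by omega)).2)
      (fun hjb => by
        rcases not_and_or.mp hstop with hb | hm
        · exact absurd hjb hb
        · omega)
      rfl

theorem B_eval (mn : Nat) (hm : 1 ≤ mn) (k : Int) (score : List Int) :
    solution_alt k (mn : Int) score
      = ∑ i ∈ Finset.range (score.length / mn),
          (PySem.List.sorted score (fun x => x) true).getD ((i + 1) * mn - 1) 0 * (mn : Int) := by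
  simp only [solution_alt, PySem.List.len_eq]
  rw [PySem.Dict.foldl_insert_getD_add_one_eq_counter, PySem.Dict.keys_counter,
    PySem.Int.floordiv_natCast]
  simp only [PySem.Dict.getD_counter]
  have hbox : ((score.length / mn : Nat) : Int) * (mn : Int)
      ≤ ((PySem.List.sorted score (fun x => x) true).length : Int) := by
    rw [PySem.List.length_sorted]
    exact_mod_cast Nat.div_mul_le_self score.length mn
  have hmain := loop_inv mn hm ((score.length / mn : Nat) : Int)
    (PySem.List.sorted score (fun x => x) true) (fun v => (List.count v score : Int)) hbox
    (PySem.List.sorted (PySem.Set.ofList score) (fun x => x) true) 0 1 0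
    (vs_pairwise score)
    (fun v hv => by
      have hvmem : v ∈ score := (PySem.Set.mem_ofList score v).mp
        ((PySem.List.mem_sorted _ _ _ v).mp hv)
      have h := List.count_pos_iff.mpr hvmem
      show (1 : Int) ≤ (List.count v score : Int)
      omega)
    le_rfl
    (by
      rw [show ((0 : Int)).toNat = 0 from rfl, List.drop_zero, desc_eq_flat score]
      simp only [Int.toNat_natCast])
    le_rfl
    (le_add_of_nonneg_left (Int.natCast_nonneg _))
    (by norm_num)
    (fun _ => by omega)
    (by simp)
  rw [Int.toNat_natCast] at hmain
  exact hmain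

-- ===== VERDICT (by name: the statement is the Claim_ definition above) =====
theorem solution_spec : Claim_equal_solution := by
  intro k m score _ hpre
  unfold Spec_solution
  rcases lt_trichotomy m 0 with hneg | hz | hpos
  · rw [A_neg k m score hneg, B_neg k m score hneg]
  · exact absurd hz hpre
  · obtain ⟨mn, rfl⟩ : ∃ mn : Nat, m = (mn : Int) := ⟨m.toNat, (Int.toNat_of_nonneg hpos.le).symm⟩
    have hm1 : 1 ≤ mn := by exact_mod_cast hpos
    rw [A_eval mn hm1, B_eval mn hm1]
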